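-- pv_equiv track=rewrite | github.com/cherry-ni/study-algoexpert | Arrays/Medium/sweet-and-savory.py | sweetAndSavory2
-- ===== SOURCE A (Python) =====
-- def sweetAndSavory2(dishes, target):
--     # O(n) space
--     sweet = [d for d in dishes if d < 0]
--     savory = [d for d in dishes if d > 0]
--
--     if not sweet or not savory :
--         return [0, 0]
--
--     # O(nlog(n))
--     sweet.sort(reverse = True)
--     savory.sort()
--
--     best_pairing = [0, 0]
--     closest_diff = float('inf')
--
--     i, j = 0, 0
--     while i < len(sweet) and j < len(savory):
--         curr_sum = sweet[i] + savory[j]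
--         cur_diff = target - curr_sum
--
--         if closest_diff > cur_diff >= 0 :
--             best_pairing = [sweet[i], savory[j]]
--             closest_diff = cur_diff
--
--         if curr_sum < target:
--             j += 1
--         else:
--             i += 1
--
--     return best_pairing
-- ===== SOURCE B (Python) =====
-- def sweetAndSavory2(dishes, target):
--     sweet = sorted((d for d in dishes if d < 0), reverse=True)
--     savory = sorted(d for d in dishes if d > 0)
--     if not sweet or not savory:
--         return [0, 0]
--     best_pairing = [0, 0]
--     closest_diff = None
--     for s in sweet:
--         for v in savory:
--             cur_diff = target - (s + v)
--             if 0 <= cur_diff and (closest_diff is None or cur_diff < closest_diff):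
--                 best_pairing = [s, v]
--                 closest_diff = cur_diff
--     return best_pairing
-- ===== Notes on version B (the rewrite author's own statement) =====
-- stated objective: simpler
-- what changed: A's two-pointer sweep over the sorted sweet/savory lists is replaced by a plain exhaustive double loop over every sweet x savory pair (same partition, same sorts, same strict 'closest > diff >= 0' update), which reproduces A's result including its tie-breaking but is far plainer to read; it is not faster (O(n*m) vs A's O(n log n)).
import Mathlib
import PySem

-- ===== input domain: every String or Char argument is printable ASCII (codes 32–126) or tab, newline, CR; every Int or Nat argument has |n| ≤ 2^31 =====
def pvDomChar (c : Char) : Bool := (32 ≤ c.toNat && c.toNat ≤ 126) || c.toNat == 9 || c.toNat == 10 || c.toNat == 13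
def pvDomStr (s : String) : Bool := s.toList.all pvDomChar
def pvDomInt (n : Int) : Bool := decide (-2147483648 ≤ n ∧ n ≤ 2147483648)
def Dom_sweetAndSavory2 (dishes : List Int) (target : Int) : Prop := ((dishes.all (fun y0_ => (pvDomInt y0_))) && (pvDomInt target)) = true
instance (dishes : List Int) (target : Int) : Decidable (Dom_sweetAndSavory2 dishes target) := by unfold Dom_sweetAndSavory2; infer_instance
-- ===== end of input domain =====

-- B replaces A's two-pointer scan by a plain nested loop over all sweet×savory pairs
-- (same partition, sorts and strict update test); objective: simpler/alternative, not faster.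

-- ===== PORT A =====
-- the while-loop: the i/j pointers are rendered as the suffixes of sweet/savory they point into
def sweetPtrLoop (target : Int) : List Int → List Int → List Int → Option Int → List Int × Option Int
  | [], _, best, closest => (best, closest)
  | _ :: _, [], best, closest => (best, closest)
  | s :: sw, v :: sv, best, closest =>
      let currSum := s + v
      let curDiff := target - currSum
      let cond := (match closest with
                   | none => true
                   | some c => decide (curDiff < c)) && decide (0 ≤ curDiff)
      let best' := if cond then [s, v] else best
      let closest' := if cond then some curDiff else closest
      if currSum < target then sweetPtrLoop target (s :: sw) sv best' closest'
      else sweetPtrLoop target sw (v :: sv) best' closest'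
termination_by sw sv _ _ => sw.length + sv.length

def sweetAndSavory2 (dishes : List Int) (target : Int) : List Int :=
  let sweet := dishes.filter (fun d => decide (d < 0))
  let savory := dishes.filter (fun d => decide (0 < d))
  if sweet = [] ∨ savory = [] then [0, 0]
  else
    let sweet := PySem.List.sorted sweet (fun x => x) true
    let savory := PySem.List.sorted savory (fun x => x) false
    (sweetPtrLoop target sweet savory [0, 0] none).1

-- ===== PORT B =====
def sweetAndSavory2_alt (dishes : List Int) (target : Int) : List Int :=
  let sweet := PySem.List.sorted (dishes.filter (fun d => decide (d < 0))) (fun x => x) true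
  let savory := PySem.List.sorted (dishes.filter (fun d => decide (0 < d))) (fun x => x) false
  if sweet = [] ∨ savory = [] then [0, 0]
  else
    (sweet.foldl
      (fun st s => savory.foldl
        (fun (st : List Int × Option Int) v =>
          let curDiff := target - (s + v)
          if decide (0 ≤ curDiff) && (match st.2 with
                                      | none => true
                                      | some c => decide (curDiff < c))
          then ([s, v], some curDiff) else st)
        st)
      ([0, 0], (none : Option Int))).1

-- ===== PRECONDITION & SPEC =====
def Spec_sweetAndSavory2 (dishes : List Int) (target : Int) (out : List Int) : Prop := out = sweetAndSavory2_alt dishes target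
instance (dishes : List Int) (target : Int) (out : List Int) : Decidable (Spec_sweetAndSavory2 dishes target out) := by unfold Spec_sweetAndSavory2; infer_instance

-- ===== CLAIM (what is proved, stated in full; the proofs are below) =====
def Claim_equal_sweetAndSavory2 : Prop := ∀ (dishes : List Int) (target : Int), Dom_sweetAndSavory2 dishes target → Spec_sweetAndSavory2 dishes target (sweetAndSavory2 dishes target)

-- ===== LEMMAS AND PROOFS =====

-- the common update step, as a function of one (sweet, savory) pair
def upd (target : Int) (st : List Int × Option Int) (p : Int × Int) : List Int × Option Int :=
  if ((match st.2 with
       | none => true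
       | some c => decide (target - (p.1 + p.2) < c)) && decide (0 ≤ target - (p.1 + p.2)))
  then ([p.1, p.2], some (target - (p.1 + p.2))) else st

-- all pairs in B's nested-loop order: first row of sw paired with sv, later rows with full SV
def pairsL (SV : List Int) : List Int → List Int → List (Int × Int)
  | [], _ => []
  | s :: sw, sv => sv.map (fun v => (s, v)) ++ pairsL SV sw SV

lemma upd_noop_neg {target : Int} (st : List Int × Option Int) (p : Int × Int)
    (h : target - (p.1 + p.2) < 0) : upd target st p = st := by
  have hb : ¬ (((match st.2 with
       | none => true
       | some c => decide (target - (p.1 + p.2) < c)) && decide (0 ≤ target - (p.1 + p.2))) = true) := by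
    simp only [Bool.and_eq_true, decide_eq_true_eq, not_and]
    intro _
    omega
  unfold upd
  rw [if_neg hb]

lemma upd_noop_le {target : Int} (st : List Int × Option Int) (p : Int × Int) {c : Int}
    (h2 : st.2 = some c) (h : c ≤ target - (p.1 + p.2)) : upd target st p = st := by
  have hb : ¬ (((match st.2 with
       | none => true
       | some c => decide (target - (p.1 + p.2) < c)) && decide (0 ≤ target - (p.1 + p.2))) = true) := by
    rw [h2]
    simp only [Bool.and_eq_true, decide_eq_true_eq, not_and]
    intro h'
    omega
  unfold upd
  rw [if_neg hb]

lemma upd_snd_le_some {target : Int} (st : List Int × Option Int) (p : Int × Int) {c : Int}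
    (h2 : st.2 = some c) : ∃ c', (upd target st p).2 = some c' ∧ c' ≤ c := by
  unfold upd
  by_cases hb : ((match st.2 with
       | none => true
       | some c => decide (target - (p.1 + p.2) < c)) && decide (0 ≤ target - (p.1 + p.2))) = true
  · rw [if_pos hb]
    rw [h2] at hb
    simp only [Bool.and_eq_true, decide_eq_true_eq] at hb
    exact ⟨_, rfl, le_of_lt hb.1⟩
  · rw [if_neg hb]
    exact ⟨c, h2, le_refl c⟩

lemma upd_snd_le_d {target : Int} (st : List Int × Option Int) (p : Int × Int)
    (h0 : 0 ≤ target - (p.1 + p.2)) :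
    ∃ c', (upd target st p).2 = some c' ∧ c' ≤ target - (p.1 + p.2) := by
  unfold upd
  by_cases hb : ((match st.2 with
       | none => true
       | some c => decide (target - (p.1 + p.2) < c)) && decide (0 ≤ target - (p.1 + p.2))) = true
  · rw [if_pos hb]
    exact ⟨_, rfl, le_refl _⟩
  · rw [if_neg hb]
    match h2 : st.2 with
    | none =>
        rw [h2] at hb
        simp only [Bool.true_and, decide_eq_true_eq] at hb
        exact absurd h0 hb
    | some c =>
        rw [h2] at hb
        simp only [Bool.and_eq_true, decide_eq_true_eq, not_and] at hb
        exact ⟨c, rfl, by omega⟩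

lemma foldl_noop {target : Int} {st : List Int × Option Int} :
    ∀ (L : List (Int × Int)), (∀ p ∈ L, upd target st p = st) →
    List.foldl (upd target) st L = st := by
  intro L
  induction L with
  | nil => intro _; rfl
  | cons p L ih =>
      intro h
      have hp := h p (List.mem_cons_self ..)
      simp only [List.foldl_cons, hp]
      exact ih (fun q hq => h q (List.mem_cons_of_mem _ hq))

lemma mem_pairsL {SV : List Int} {p : Int × Int} :
    ∀ (sw sv : List Int), (∀ x ∈ sv, x ∈ SV) → p ∈ pairsL SV sw sv →
    p.1 ∈ sw ∧ p.2 ∈ SV := by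
  intro sw
  induction sw with
  | nil => intro sv _ h; simp [pairsL] at h
  | cons s sw ih =>
      intro sv hsub h
      simp only [pairsL, List.mem_append, List.mem_map] at h
      rcases h with ⟨v, hv, rfl⟩ | h
      · exact ⟨List.mem_cons_self .., hsub v hv⟩
      · have := ih SV (fun x hx => hx) h
        exact ⟨List.mem_cons_of_mem _ this.1, this.2⟩

-- one step of the while loop, expressed through the common update step
lemma loop_cons (target s v : Int) (sw sv : List Int) (best : List Int) (closest : Option Int) :
    sweetPtrLoop target (s :: sw) (v :: sv) best closest =
      if s + v < target then
        sweetPtrLoop target (s :: sw) sv (upd target (best, closest) (s, v)).1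
          (upd target (best, closest) (s, v)).2
      else
        sweetPtrLoop target sw (v :: sv) (upd target (best, closest) (s, v)).1
          (upd target (best, closest) (s, v)).2 := by
  cases closest <;> rw [sweetPtrLoop] <;> simp [upd] <;> split_ifs <;> rfl

-- main invariant: the two-pointer loop computes the full nested fold, given that
-- every already-skipped savory prefix P is a no-op for all remaining sweets
lemma twoPtr_eq_brute (target : Int) (SV : List Int) (hSV : SV.Pairwise (· ≤ ·)) :
    ∀ (n : Nat) (sw sv P : List Int) (best : List Int) (closest : Option Int),
      sw.length + sv.length ≤ n →
      SV = P ++ sv →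
      sw.Pairwise (· ≥ ·) →
      (∀ v' ∈ P, ∀ s' ∈ sw, ∃ c, closest = some c ∧ c ≤ target - (s' + v')) →
      sweetPtrLoop target sw sv best closest =
        List.foldl (upd target) (best, closest) (pairsL SV sw sv) := by
  intro n
  induction n with
  | zero =>
      intro sw sv P best closest hn hP hsw H
      have hsw0 : sw = [] := by cases sw <;> simp_all
      subst hsw0
      simp [sweetPtrLoop, pairsL]
  | succ n ih =>
      intro sw sv P best closest hn hP hsw H
      cases sw with
      | nil => simp [sweetPtrLoop, pairsL]
      | cons s sw' =>
        cases sv with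
        | nil =>
            have h1 : sweetPtrLoop target (s :: sw') [] best closest = (best, closest) := by
              simp [sweetPtrLoop]
            have h2 : List.foldl (upd target) (best, closest) (pairsL SV sw' SV) = (best, closest) := by
              apply foldl_noop
              intro p hp
              have hm := mem_pairsL sw' SV (fun x hx => hx) hp
              have hPv : p.2 ∈ P := by
                have h2' := hm.2
                rw [hP, List.append_nil] at h2'
                exact h2'
              obtain ⟨c, hc, hle⟩ := H p.2 hPv p.1 (List.mem_cons_of_mem _ hm.1)
              exact upd_noop_le (best, closest) p hc hle
            rw [h1]
            simp only [pairsL, List.map_nil, List.nil_append]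
            exact h2.symm
        | cons v sv' =>
            have hs_le : ∀ s' ∈ s :: sw', s' ≤ s := by
              intro s' hs'
              rcases List.mem_cons.mp hs' with rfl | hs'
              · exact le_rfl
              · exact (List.pairwise_cons.mp hsw).1 s' hs'
            have hsv_tail : (v :: sv').Pairwise (· ≤ ·) := by
              rw [hP] at hSV
              exact (List.pairwise_append.mp hSV).2.1
            have hv_le : ∀ v'' ∈ sv', v ≤ v'' := (List.pairwise_cons.mp hsv_tail).1
            rw [loop_cons]
            by_cases hlt : s + v < target
            · -- advance the savory pointer
              rw [if_pos hlt]
              obtain ⟨c', hc', hc'le⟩ := upd_snd_le_d (target := target) (best, closest) (s, v)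
                (show (0:Int) ≤ target - (s + v) by omega)
              have hc'le' : c' ≤ target - (s + v) := hc'le
              have H' : ∀ v' ∈ P ++ [v], ∀ s' ∈ s :: sw',
                  ∃ c, (upd target (best, closest) (s, v)).2 = some c ∧ c ≤ target - (s' + v') := by
                intro v' hv' s' hs'
                rcases List.mem_append.mp hv' with hv' | hv'
                · obtain ⟨c, hc, hle⟩ := H v' hv' s' hs'
                  obtain ⟨c'', hc'', hle''⟩ := upd_snd_le_some (best, closest) (s, v) hc
                  exact ⟨c'', hc'', le_trans hle'' hle⟩
                · have hvv : v' = v := by simpa using hv'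
                  subst hvv
                  have hss : s' ≤ s := hs_le s' hs'
                  exact ⟨c', hc', by omega⟩
              have ihr := ih (s :: sw') sv' (P ++ [v])
                (upd target (best, closest) (s, v)).1 (upd target (best, closest) (s, v)).2
                (by simp at hn ⊢; omega) (by rw [hP]; simp) hsw H'
              rw [ihr]
              have hpl : pairsL SV (s :: sw') (v :: sv') = (s, v) :: pairsL SV (s :: sw') sv' := by
                simp [pairsL]
              rw [hpl, List.foldl_cons]
            · -- advance the sweet pointer
              rw [if_neg hlt]
              have H' : ∀ v' ∈ P, ∀ s' ∈ sw',
                  ∃ c, (upd target (best, closest) (s, v)).2 = some c ∧ c ≤ target - (s' + v') := by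
                intro v' hv' s' hs'
                obtain ⟨c, hc, hle⟩ := H v' hv' s' (List.mem_cons_of_mem _ hs')
                obtain ⟨c'', hc'', hle''⟩ := upd_snd_le_some (best, closest) (s, v) hc
                exact ⟨c'', hc'', le_trans hle'' hle⟩
              have ihr := ih sw' (v :: sv') P
                (upd target (best, closest) (s, v)).1 (upd target (best, closest) (s, v)).2
                (by simp at hn ⊢; omega) hP (List.pairwise_cons.mp hsw).2 H'
              rw [ihr]
              -- fold of the rest of the current row is a no-op on the updated state
              have hrow : List.foldl (upd target) (best, closest) ((v :: sv').map (fun v => (s, v))) =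
                  upd target (best, closest) (s, v) := by
                simp only [List.map_cons, List.foldl_cons]
                apply foldl_noop
                intro p hp
                obtain ⟨v'', hv'', rfl⟩ := List.mem_map.mp hp
                have hvv : v ≤ v'' := hv_le v'' hv''
                by_cases h0 : 0 ≤ target - (s + v'')
                · obtain ⟨c', hc', hc'le⟩ := upd_snd_le_d (target := target) (best, closest) (s, v)
                    (show (0:Int) ≤ target - (s + v) by omega)
                  have hc'le' : c' ≤ target - (s + v) := hc'le
                  exact upd_noop_le _ _ hc' (show c' ≤ target - (s + v'') by omega)
                · exact upd_noop_neg _ _ (show target - (s + v'') < 0 by omega)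
              -- the skipped savory prefix P of the next row is a no-op on the updated state
              have hskip : List.foldl (upd target) (upd target (best, closest) (s, v)) (pairsL SV sw' SV) =
                  List.foldl (upd target) (upd target (best, closest) (s, v)) (pairsL SV sw' (v :: sv')) := by
                cases sw' with
                | nil => rfl
                | cons s₂ sw'' =>
                    have hsplit : pairsL SV (s₂ :: sw'') SV =
                        P.map (fun v => (s₂, v)) ++
                          ((v :: sv').map (fun v => (s₂, v)) ++ pairsL SV sw'' SV) := by
                      simp [pairsL, hP]
                    rw [hsplit, List.foldl_append]
                    have hP0 : List.foldl (upd target) (upd target (best, closest) (s, v))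
                        (P.map (fun v => (s₂, v))) = upd target (best, closest) (s, v) := by
                      apply foldl_noop
                      intro p hp
                      obtain ⟨v', hv', rfl⟩ := List.mem_map.mp hp
                      obtain ⟨c, hc, hle⟩ := H' v' hv' s₂ (List.mem_cons_self ..)
                      exact upd_noop_le _ _ hc hle
                    rw [hP0]
                    simp [pairsL]
              simp only [pairsL, List.foldl_append, hrow, hskip]

-- B's nested fold is the fold of the common update step over pairsL
lemma brute_eq_pairs (target : Int) (SV : List Int) :
    ∀ (sw : List Int) (st : List Int × Option Int),
      sw.foldl
        (fun st s => SV.foldl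
          (fun (st : List Int × Option Int) v =>
            let curDiff := target - (s + v)
            if decide (0 ≤ curDiff) && (match st.2 with
                                        | none => true
                                        | some c => decide (curDiff < c))
            then ([s, v], some curDiff) else st)
          st)
        st
      = List.foldl (upd target) st (pairsL SV sw SV) := by
  have hrow : ∀ (s : Int) (sv : List Int) (st : List Int × Option Int),
      sv.foldl
        (fun (st : List Int × Option Int) v =>
          let curDiff := target - (s + v)
          if decide (0 ≤ curDiff) && (match st.2 with
                                      | none => true
                                      | some c => decide (curDiff < c))
          then ([s, v], some curDiff) else st)
        st
      = List.foldl (upd target) st (sv.map (fun v => (s, v))) := by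
    intro s sv st
    rw [List.foldl_map]
    have hfun : (fun (st : List Int × Option Int) v =>
          let curDiff := target - (s + v)
          if decide (0 ≤ curDiff) && (match st.2 with
                                      | none => true
                                      | some c => decide (curDiff < c))
          then (([s, v] : List Int), some curDiff) else st)
        = (fun (st : List Int × Option Int) v => upd target st (s, v)) := by
      funext st v
      show (if decide (0 ≤ target - (s + v)) && (match st.2 with
              | none => true
              | some c => decide (target - (s + v) < c))
            then (([s, v] : List Int), some (target - (s + v))) else st) = upd target st (s, v)
      rw [upd, Bool.and_comm]
    rw [hfun]
  intro sw
  induction sw with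
  | nil => intro st; rfl
  | cons s sw ih =>
      intro st
      simp only [List.foldl_cons, pairsL, List.foldl_append]
      rw [hrow, ih]

lemma sorted_eq_nil_iff (xs : List Int) (rev : Bool) :
    PySem.List.sorted xs (fun x => x) rev = [] ↔ xs = [] := by
  constructor
  · intro h
    have hl := PySem.List.length_sorted xs (fun x => x) rev
    rw [h] at hl
    exact List.eq_nil_of_length_eq_zero hl.symm
  · intro h
    subst h
    have hl := PySem.List.length_sorted ([] : List Int) (fun x => x) rev
    exact List.eq_nil_of_length_eq_zero hl

-- ===== VERDICT (by name: the statement is the Claim_ definition above) =====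
theorem sweetAndSavory2_spec : Claim_equal_sweetAndSavory2 := by
  intro dishes target _
  unfold Spec_sweetAndSavory2 sweetAndSavory2 sweetAndSavory2_alt
  simp only []
  by_cases hemp : dishes.filter (fun d => decide (d < 0)) = [] ∨
      dishes.filter (fun d => decide (0 < d)) = []
  · rw [if_pos hemp, if_pos]
    rcases hemp with h | h
    · exact Or.inl ((sorted_eq_nil_iff _ _).mpr h)
    · exact Or.inr ((sorted_eq_nil_iff _ _).mpr h)
  · have hemp' : ¬ (PySem.List.sorted (dishes.filter (fun d => decide (d < 0))) (fun x => x) true = [] ∨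
        PySem.List.sorted (dishes.filter (fun d => decide (0 < d))) (fun x => x) false = []) := by
      intro h
      rcases h with h | h
      · exact hemp (Or.inl ((sorted_eq_nil_iff _ _).mp h))
      · exact hemp (Or.inr ((sorted_eq_nil_iff _ _).mp h))
    rw [if_neg hemp, if_neg hemp']
    have hSVp : (PySem.List.sorted (dishes.filter (fun d => decide (0 < d))) (fun x => x) false).Pairwise (· ≤ ·) :=
      PySem.List.sorted_pairwise (dishes.filter (fun d => decide (0 < d))) (fun x => x)
    have hSWp : (PySem.List.sorted (dishes.filter (fun d => decide (d < 0))) (fun x => x) true).Pairwise (· ≥ ·) :=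
      PySem.List.sorted_pairwise_rev (dishes.filter (fun d => decide (d < 0))) (fun x => x)
    have hmain := twoPtr_eq_brute target
      (PySem.List.sorted (dishes.filter (fun d => decide (0 < d))) (fun x => x) false) hSVp
      ((PySem.List.sorted (dishes.filter (fun d => decide (d < 0))) (fun x => x) true).length +
        (PySem.List.sorted (dishes.filter (fun d => decide (0 < d))) (fun x => x) false).length)
      (PySem.List.sorted (dishes.filter (fun d => decide (d < 0))) (fun x => x) true)
      (PySem.List.sorted (dishes.filter (fun d => decide (0 < d))) (fun x => x) false)
      [] [0, 0] none (le_refl _) (by simp) hSWp (by simp)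
    rw [hmain, brute_eq_pairs]
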